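-- pv_equiv track=rewrite | github.com/callmeliuchu/gomoku-ai-code | ppo_9x9_5/gomoku_ppo.py | forward_transform_coords
-- ===== SOURCE A (Python) =====
-- def forward_transform_coords(
--     row: int,
--     col: int,
--     board_size: int,
--     rotation_k: int,
--     flip: bool,
-- ) -> tuple[int, int]:
--     for _ in range(rotation_k % 4):
--         row, col = board_size - 1 - col, row
--     if flip:
--         col = board_size - 1 - col
--     return row, col
-- ===== SOURCE B (Python) =====
-- def forward_transform_coords(
--     row: int,
--     col: int,
--     board_size: int,
--     rotation_k: int,
--     flip: bool,
-- ) -> tuple[int, int]: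
--     k = rotation_k % 4
--     m = board_size - 1
--     if k == 0:
--         r, c = row, col
--     elif k == 1:
--         r, c = m - col, row
--     elif k == 2:
--         r, c = m - row, m - col
--     else:
--         r, c = col, m - row
--     if flip:
--         c = m - c
--     return r, c
-- ===== Notes on version B (the rewrite author's own statement) =====
-- stated objective: faster
-- what changed: Replaces the iterated 90-degree rotation loop with a closed-form case analysis on rotation_k % 4 giving the composed coordinate formula directly.
import Mathlib
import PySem

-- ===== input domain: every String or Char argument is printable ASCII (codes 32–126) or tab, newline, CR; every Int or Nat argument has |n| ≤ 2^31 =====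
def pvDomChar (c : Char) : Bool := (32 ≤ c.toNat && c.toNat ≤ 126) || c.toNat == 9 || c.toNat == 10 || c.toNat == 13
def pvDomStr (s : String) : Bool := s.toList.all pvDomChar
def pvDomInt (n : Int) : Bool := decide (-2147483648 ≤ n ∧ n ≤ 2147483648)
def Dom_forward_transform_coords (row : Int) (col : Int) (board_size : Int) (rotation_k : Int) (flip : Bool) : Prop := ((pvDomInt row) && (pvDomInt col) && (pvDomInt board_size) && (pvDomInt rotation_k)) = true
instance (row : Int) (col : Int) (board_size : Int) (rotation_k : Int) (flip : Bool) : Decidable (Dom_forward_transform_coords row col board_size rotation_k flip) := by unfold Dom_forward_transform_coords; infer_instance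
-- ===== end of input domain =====

-- B replaces A's iterated 90°-rotation loop with a closed-form case analysis on rotation_k % 4 (objective: faster by a constant mechanism — no loop).

-- ===== PORT A =====
-- the loop 'for _ in range(rotation_k % 4): row, col = board_size - 1 - col, row'
def pvRotLoop (n : Nat) (row col board_size : Int) : Int × Int :=
  match n with
  | 0 => (row, col)
  | Nat.succ m => pvRotLoop m (board_size - 1 - col) row board_size

def forward_transform_coords (row : Int) (col : Int) (board_size : Int) (rotation_k : Int) (flip : Bool) : Int × Int :=
  let (row, col) := pvRotLoop (PySem.Int.mod rotation_k 4).toNat row col board_size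
  let col := if flip then board_size - 1 - col else col
  (row, col)

-- ===== PORT B =====
def forward_transform_coords_alt (row : Int) (col : Int) (board_size : Int) (rotation_k : Int) (flip : Bool) : Int × Int :=
  let k := PySem.Int.mod rotation_k 4
  let m := board_size - 1
  let rc : Int × Int :=
    if k = 0 then (row, col)
    else if k = 1 then (m - col, row)
    else if k = 2 then (m - row, m - col)
    else (col, m - row)
  (rc.1, if flip then m - rc.2 else rc.2)

-- ===== PRECONDITION & SPEC =====
def Spec_forward_transform_coords (row : Int) (col : Int) (board_size : Int) (rotation_k : Int) (flip : Bool) (out : Int × Int) : Prop := out = forward_transform_coords_alt row col board_size rotation_k flip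
instance (row : Int) (col : Int) (board_size : Int) (rotation_k : Int) (flip : Bool) (out : Int × Int) : Decidable (Spec_forward_transform_coords row col board_size rotation_k flip out) := by unfold Spec_forward_transform_coords; infer_instance

-- ===== CLAIM (what is proved, stated in full; the proofs are below) =====
def Claim_equal_forward_transform_coords : Prop := ∀ (row : Int) (col : Int) (board_size : Int) (rotation_k : Int) (flip : Bool), Dom_forward_transform_coords row col board_size rotation_k flip → Spec_forward_transform_coords row col board_size rotation_k flip (forward_transform_coords row col board_size rotation_k flip)

-- ===== LEMMAS AND PROOFS =====
theorem pvMod4_cases (a : Int) :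
    PySem.Int.mod a 4 = 0 ∨ PySem.Int.mod a 4 = 1 ∨ PySem.Int.mod a 4 = 2 ∨ PySem.Int.mod a 4 = 3 := by
  have h0 : (0 : Int) ≤ PySem.Int.mod a 4 := PySem.Int.mod_nonneg (a:=a) (b:=4) (by norm_num)
  have h1 : PySem.Int.mod a 4 < 4 := PySem.Int.mod_lt (a:=a) (b:=4) (by norm_num)
  omega

-- ===== VERDICT (by name: the statement is the Claim_ definition above) =====
theorem forward_transform_coords_spec : Claim_equal_forward_transform_coords := by
  intro row col board_size rotation_k flip _
  unfold Spec_forward_transform_coords forward_transform_coords forward_transform_coords_alt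
  rcases pvMod4_cases rotation_k with h | h | h | h <;>
    rw [h] <;> cases flip <;> simp [pvRotLoop]
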